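-- pv_equiv track=rewrite | github.com/tdsc2022-artifact/artifact | utils/svf_parser.py | getCallChainList
-- ===== SOURCE A (Python) =====
-- def getCallChainList(calleeToCallerDict, entries):
--     '''
--
--     :param calleeToCallerDict:
--     :param entries:
--     :return:
--     '''
--     callChainList = list()
--     for entry in list(entries):
--         callChain = list()
--         callChain.insert(0, entry)
--         dfsCallChain(entry, calleeToCallerDict, entries, callChainList,
--                      callChain)
--     return callChainList
--
-- def dfsCallChain(entry, calleeToCallerDict, entries, callChainList, callChain):
--     '''
--
--     :param entry:
--     :param calleeToCallerDict:
--     :param entries: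
--     :param callChainList:
--     :param callChain:
--     :return:
--     '''
--     if entry not in calleeToCallerDict:
--         callChainList.append(callChain.copy())
--         return
--     callerList = calleeToCallerDict[entry]
--     appendOnce = False
--     for caller in callerList:
--         if caller in callChain:
--             if not appendOnce:
--                 appendOnce = True
--                 callChainList.append(callChain.copy())
--             continue
--         if caller in entries:
--
--             callChain.insert(0, caller)
--             dfsCallChain(caller, calleeToCallerDict, entries, callChainList,
--                          callChain)
--             callChain.pop(0)
--             return
--         else:
--             if not appendOnce:
--                 appendOnce = True
--                 callChainList.append(callChain.copy())
--
--     return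
-- ===== SOURCE B (Python) =====
-- def getCallChainList(calleeToCallerDict, entries):
--     callChainList = []
--     for entry in entries:
--         callChain = [entry]
--         node = entry
--         while True:
--             if node not in calleeToCallerDict:
--                 callChainList.append(callChain.copy())
--                 break
--             appended = False
--             nxt = None
--             for caller in calleeToCallerDict[node]:
--                 if caller in callChain:
--                     if not appended:
--                         appended = True
--                         callChainList.append(callChain.copy())
--                 elif caller in entries:
--                     nxt = caller
--                     break
--                 else:
--                     if not appended:
--                         appended = True
--                         callChainList.append(callChain.copy())
--             if nxt is None:
--                 break
--             callChain.insert(0, nxt)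
--             node = nxt
--     return callChainList
-- ===== Notes on version B (the rewrite author's own statement) =====
-- stated objective: alternative
-- what changed: Replaces A's recursive dfsCallChain (which, since it returns immediately after the single recursive descent, is really a linear walk) by an iterative while-loop that keeps the current node and chain explicitly and scans each caller list for the at-most-one snapshot append and the next node.
import Mathlib
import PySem

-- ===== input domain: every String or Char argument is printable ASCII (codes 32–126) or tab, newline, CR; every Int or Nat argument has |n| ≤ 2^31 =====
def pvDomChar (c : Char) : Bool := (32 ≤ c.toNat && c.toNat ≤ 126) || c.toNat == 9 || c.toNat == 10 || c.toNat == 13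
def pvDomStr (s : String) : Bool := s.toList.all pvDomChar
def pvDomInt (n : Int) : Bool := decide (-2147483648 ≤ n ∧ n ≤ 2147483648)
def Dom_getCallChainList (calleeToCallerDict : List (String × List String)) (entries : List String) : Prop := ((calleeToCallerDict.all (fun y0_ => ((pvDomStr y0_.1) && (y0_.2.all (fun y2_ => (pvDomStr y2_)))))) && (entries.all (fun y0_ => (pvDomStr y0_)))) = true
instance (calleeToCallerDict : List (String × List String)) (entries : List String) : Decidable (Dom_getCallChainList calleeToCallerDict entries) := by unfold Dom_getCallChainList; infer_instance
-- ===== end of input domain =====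

-- B replaces A's recursive dfsCallChain (which descends on the first eligible caller and then returns)
-- by an iterative while-loop walk with an explicit scan of the caller list; same return value, no recursion.
-- Objective: alternative decomposition (iterative vs recursive); no speed claim.

-- termination measure lemma, cited by the ports' decreasing_by
theorem pvFreeLt (entries chain : List String) (c : String) (hc : c ∈ entries) (hn : c ∉ chain) :
    (entries.toFinset \ (c :: chain).toFinset).card < (entries.toFinset \ chain.toFinset).card := by
  rw [List.toFinset_cons, Finset.sdiff_insert]
  exact Finset.card_erase_lt_of_mem (Finset.mem_sdiff.mpr ⟨List.mem_toFinset.mpr hc, fun h => hn (List.mem_toFinset.mp h)⟩)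

-- ===== PORT A =====
-- dfsCallChain: the recursive DFS of A; the dict is an association list, lookup = first match.
-- A's for-loop over callerList is pvLoopA; the recursive call inside the loop (followed by
-- 'callChain.pop(0); return') is the pvDfsA call in the 'caller in entries' branch.
mutual
def pvDfsA (d : List (String × List String)) (entries : List String) (node : String)
    (chain : List String) (acc : List (List String)) : List (List String) :=
  match d.lookup node with
  | none => acc ++ [chain]
  | some callers => pvLoopA d entries chain callers false acc
termination_by ((entries.toFinset \ chain.toFinset).card, 1, 0)

def pvLoopA (d : List (String × List String)) (entries : List String) (chain : List String)
    (callers : List String) (appendOnce : Bool) (acc : List (List String)) : List (List String) :=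
  match callers with
  | [] => acc
  | caller :: rest =>
    if caller ∈ chain then
      pvLoopA d entries chain rest true (if appendOnce then acc else acc ++ [chain])
    else if caller ∈ entries then
      pvDfsA d entries caller (caller :: chain) acc
    else
      pvLoopA d entries chain rest true (if appendOnce then acc else acc ++ [chain])
termination_by ((entries.toFinset \ chain.toFinset).card, 0, callers.length)
decreasing_by
  · apply Prod.Lex.right; apply Prod.Lex.right; simp
  · apply Prod.Lex.left; exact pvFreeLt entries chain caller ‹caller ∈ entries› ‹caller ∉ chain›
  · apply Prod.Lex.right; apply Prod.Lex.right; simp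
end

def getCallChainList (calleeToCallerDict : List (String × List String)) (entries : List String) : List (List String) :=
  entries.foldl (fun acc entry => pvDfsA calleeToCallerDict entries entry [entry] acc) []

-- ===== PORT B =====
-- pvScanB: B's inner for-loop over the caller list: threads (appended, callChainList) and
-- returns the next node (the first caller in entries and not in the chain), or none.
def pvScanB (entries chain : List String) (callers : List String) (appended : Bool)
    (acc : List (List String)) : List (List String) × Option String :=
  match callers with
  | [] => (acc, none)
  | caller :: rest =>
    if caller ∈ chain then
      pvScanB entries chain rest true (if appended then acc else acc ++ [chain])
    else if caller ∈ entries then (acc, some caller)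
    else
      pvScanB entries chain rest true (if appended then acc else acc ++ [chain])

-- a next node produced by the scan is in entries and not in the chain (used for pvRunB's termination)
theorem pvScanB_some (entries chain : List String) : ∀ (callers : List String) (ap : Bool)
    (acc acc' : List (List String)) (c : String),
    pvScanB entries chain callers ap acc = (acc', some c) → c ∈ entries ∧ c ∉ chain := by
  intro callers
  induction callers with
  | nil => intro ap acc acc' c h; simp [pvScanB] at h
  | cons caller rest ih =>
    intro ap acc acc' c h
    rw [pvScanB] at h
    by_cases h1 : caller ∈ chain
    · simp only [h1, if_true] at h; exact ih _ _ _ _ h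
    · by_cases h2 : caller ∈ entries
      · simp only [h1, h2, if_false, if_true] at h
        injection h with ha hb
        injection hb with hc
        subst hc
        exact ⟨h2, h1⟩
      · simp only [h1, h2, if_false] at h; exact ih _ _ _ _ h

-- B's while-loop: one step per node of the growing chain
def pvRunB (d : List (String × List String)) (entries : List String) (node : String)
    (chain : List String) (acc : List (List String)) : List (List String) :=
  match d.lookup node with
  | none => acc ++ [chain]
  | some callers =>
    match h : pvScanB entries chain callers false acc with
    | (acc', none) => acc'
    | (acc', some c) => pvRunB d entries c (c :: chain) acc'
termination_by (entries.toFinset \ chain.toFinset).card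
decreasing_by
  have := pvScanB_some entries chain callers false acc acc' c h
  exact pvFreeLt entries chain c this.1 this.2

def getCallChainList_alt (calleeToCallerDict : List (String × List String)) (entries : List String) : List (List String) :=
  entries.foldl (fun acc entry => pvRunB calleeToCallerDict entries entry [entry] acc) []

-- ===== PRECONDITION & SPEC =====
def Spec_getCallChainList (calleeToCallerDict : List (String × List String)) (entries : List String) (out : List (List String)) : Prop := out = getCallChainList_alt calleeToCallerDict entries
instance (calleeToCallerDict : List (String × List String)) (entries : List String) (out : List (List String)) : Decidable (Spec_getCallChainList calleeToCallerDict entries out) := by unfold Spec_getCallChainList; infer_instance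

-- ===== CLAIM (what is proved, stated in full; the proofs are below) =====
def Claim_equal_getCallChainList : Prop := ∀ (calleeToCallerDict : List (String × List String)) (entries : List String), Dom_getCallChainList calleeToCallerDict entries → Spec_getCallChainList calleeToCallerDict entries (getCallChainList calleeToCallerDict entries)

-- ===== LEMMAS AND PROOFS =====

-- A's inner loop equals B's scan followed by the dispatch on its result
theorem pvLoopA_eq_scan (d : List (String × List String)) (entries chain : List String) :
    ∀ (callers : List String) (ap : Bool) (acc : List (List String)),
    pvLoopA d entries chain callers ap acc =
      (match pvScanB entries chain callers ap acc with
       | (acc', none) => acc'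
       | (acc', some c) => pvDfsA d entries c (c :: chain) acc') := by
  intro callers
  induction callers with
  | nil => intro ap acc; rw [pvLoopA, pvScanB]
  | cons caller rest ih =>
    intro ap acc
    rw [pvLoopA, pvScanB]
    by_cases h1 : caller ∈ chain
    · simp only [h1, if_true]; exact ih _ _
    · by_cases h2 : caller ∈ entries
      · simp only [h1, h2, if_false, if_true]
      · simp only [h1, h2, if_false]; exact ih _ _

-- the recursive DFS of A equals the iterative walk of B
theorem pvDfsA_eq_pvRunB (d : List (String × List String)) (entries : List String) :
    ∀ (n : ℕ) (chain : List String) (node : String) (acc : List (List String)),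
    (entries.toFinset \ chain.toFinset).card < n →
    pvDfsA d entries node chain acc = pvRunB d entries node chain acc := by
  intro n
  induction n with
  | zero => intro chain node acc h; omega
  | succ n ih =>
    intro chain node acc h
    rw [pvDfsA, pvRunB]
    cases hl : d.lookup node with
    | none => rfl
    | some callers =>
      dsimp only
      rw [pvLoopA_eq_scan]
      split
      next acc' heq =>
        rw [heq]
      next acc' c heq =>
        rw [heq]
        have hc := pvScanB_some entries chain callers false acc acc' c heq
        exact ih (c :: chain) c acc' (by have := pvFreeLt entries chain c hc.1 hc.2; omega)

-- ===== VERDICT (by name: the statement is the Claim_ definition above) =====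
theorem getCallChainList_spec : Claim_equal_getCallChainList := by
  intro d entries _
  unfold Spec_getCallChainList getCallChainList getCallChainList_alt
  apply List.foldl_ext
  intro acc entry _
  exact pvDfsA_eq_pvRunB d entries ((entries.toFinset \ [entry].toFinset).card + 1) [entry] entry acc (by omega)
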